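-- pv_equiv track=rewrite | github.com/YSWFelicity/Python_Advanced | hw06/recipes.py | isListEmpty
-- ===== SOURCE A (Python) =====
-- def isListEmpty(ingredient):
--     '''
--     Function -- isListEmpty
--         Check if a string is empty. All elements of list coming from the
--         string are empty.
--     Parameters:
--         ingredient -- A string. The elements of the string are seperated by
--         comma.
--     Returns:
--         True if empty. Otherwise, False.
--     '''
--     ingredient_ele = ingredient.split(",")
--     non_emp_count = 0
--     for element in ingredient_ele:
--         if element.strip() != "":
--             non_emp_count += 1
--     if non_emp_count == 0:
--         return True
--     else:
--         return False
-- ===== SOURCE B (Python) =====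
-- def isListEmpty(ingredient):
--     return ingredient.replace(",", "").strip() == ""
-- ===== Notes on version B (the rewrite author's own statement) =====
-- stated objective: simpler
-- what changed: Instead of splitting on commas and counting non-empty stripped elements in a loop, B deletes all commas and checks that the remainder strips to the empty string; no list of pieces is built and no counter loop runs.
import Mathlib
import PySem

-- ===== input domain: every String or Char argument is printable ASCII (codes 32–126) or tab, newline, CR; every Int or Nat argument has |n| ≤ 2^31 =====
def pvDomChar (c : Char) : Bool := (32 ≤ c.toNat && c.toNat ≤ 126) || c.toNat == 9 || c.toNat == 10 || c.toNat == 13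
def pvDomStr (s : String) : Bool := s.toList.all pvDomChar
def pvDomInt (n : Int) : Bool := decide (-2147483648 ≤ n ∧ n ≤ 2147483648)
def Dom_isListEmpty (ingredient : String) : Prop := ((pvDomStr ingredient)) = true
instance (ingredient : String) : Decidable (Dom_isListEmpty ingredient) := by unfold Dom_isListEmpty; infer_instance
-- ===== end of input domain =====

-- B deletes all commas and checks the remainder strips to empty, instead of A's split-and-count loop (objective: simpler).

-- ===== PORT A =====
def isListEmpty (ingredient : String) : Bool :=
  -- ingredient.split(",") : sep = "," is nonempty, so split? is always some
  let ingredient_ele : List String := (PySem.Str.split? ingredient ",").getD []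
  let non_emp_count : Int :=
    ingredient_ele.foldl (fun n element => if PySem.Str.strip element ≠ "" then n + 1 else n) 0
  if non_emp_count == 0 then true else false

-- ===== PORT B =====
def isListEmpty_alt (ingredient : String) : Bool :=
  PySem.Str.strip (PySem.Str.replace ingredient "," "") == ""

-- ===== PRECONDITION & SPEC =====
def Spec_isListEmpty (ingredient : String) (out : Bool) : Prop := out = isListEmpty_alt ingredient
instance (ingredient : String) (out : Bool) : Decidable (Spec_isListEmpty ingredient out) := by unfold Spec_isListEmpty; infer_instance

-- ===== CLAIM (what is proved, stated in full; the proofs are below) =====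
def Claim_equal_isListEmpty : Prop := ∀ (ingredient : String), Dom_isListEmpty ingredient → Spec_isListEmpty ingredient (isListEmpty ingredient)

-- ===== LEMMAS AND PROOFS =====

-- strip cs is empty exactly when every character of cs is whitespace
theorem pv_strip_eq_nil_iff (cs : List Char) :
    PySem.Chars.strip cs = [] ↔ ∀ c ∈ cs, PySem.Chars.isspace c = true := by
  simp only [PySem.Chars.strip, PySem.Chars.rstrip, PySem.Chars.lstrip,
    List.reverse_eq_nil_iff, List.dropWhile_eq_nil_iff, List.mem_reverse]
  constructor
  · intro h c hc
    rcases List.mem_append.mp (by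
        rw [List.takeWhile_append_dropWhile (p := PySem.Chars.isspace)]; exact hc :
        c ∈ List.takeWhile PySem.Chars.isspace cs ++ List.dropWhile PySem.Chars.isspace cs) with h1 | h2
    · exact List.mem_takeWhile_imp h1
    · exact h c h2
  · intro h c hc
    exact h c ((List.dropWhile_sublist (p := PySem.Chars.isspace)).subset hc)

-- replace.go with old = [','], new = [] is a comma filter
theorem pv_replace_go_comma (l acc : List Char) :
    PySem.Chars.replace.go [','] [] l.length l acc
      = acc.reverse ++ l.filter (fun c => c != ',') := by
  induction l generalizing acc with
  | nil => simp [PySem.Chars.replace.go]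
  | cons c t ih =>
    by_cases hc : c = ','
    · subst hc
      simpa [PySem.Chars.replace.go, List.isPrefixOf] using ih acc
    · have hpre : List.isPrefixOf [','] (c :: t) = false := by
        simp only [List.isPrefixOf, Bool.and_eq_false_iff, beq_eq_false_iff_ne]
        exact Or.inl (fun h => hc (Eq.symm h))
      simpa [PySem.Chars.replace.go, hpre, hc] using ih (c :: acc)

theorem pv_replace_comma (cs : List Char) :
    PySem.Chars.replace cs [','] [] = cs.filter (fun c => c != ',') := by
  simpa [PySem.Chars.replace] using pv_replace_go_comma cs []

-- splitOn.go flattens to the comma-filtered input (with the accumulators in front)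
theorem pv_splitOn_go_flatten (l : List Char) (fuel : Nat) (cur : List Char)
    (acc : List (List Char)) (hf : l.length < fuel) :
    (PySem.Chars.splitOn.go [','] fuel l cur acc).flatten
      = acc.reverse.flatten ++ cur.reverse ++ l.filter (fun c => c != ',') := by
  induction l generalizing fuel cur acc with
  | nil =>
    cases fuel with
    | zero => omega
    | succ f => simp [PySem.Chars.splitOn.go]
  | cons c t ih =>
    cases fuel with
    | zero => omega
    | succ f =>
      have hf' : t.length < f := by simpa using hf
      by_cases hc : c = ','
      · subst hc
        have := ih f [] (cur.reverse :: acc) hf'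
        simp only [PySem.Chars.splitOn.go, List.isPrefixOf, beq_self_eq_true,
          Bool.and_self, if_pos, List.length_cons, List.drop_succ_cons, List.drop_zero] at this ⊢
        simp [this]
      · have hpre : List.isPrefixOf [','] (c :: t) = false := by
          simp only [List.isPrefixOf, Bool.and_eq_false_iff, beq_eq_false_iff_ne]
          exact Or.inl (fun h => hc (Eq.symm h))
        have := ih f (c :: cur) acc hf'
        simp only [PySem.Chars.splitOn.go, hpre] at this ⊢
        simp [this, hc]

theorem pv_splitOn_flatten (cs : List Char) :
    (PySem.Chars.splitOn cs [',']).flatten = cs.filter (fun c => c != ',') := by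
  simpa [PySem.Chars.splitOn] using
    pv_splitOn_go_flatten cs (cs.length + 1) [] [] (by omega)

theorem pv_count_eq (L : List String) :
    L.foldl (fun n element => if PySem.Str.strip element ≠ "" then n + 1 else n) (0 : Int)
      = (L.countP (fun e => decide (PySem.Str.strip e ≠ "")) : Int) := by
  simpa using PySem.List.foldl_count_if (fun e => decide (PySem.Str.strip e ≠ "")) L 0

-- ===== VERDICT (by name: the statement is the Claim_ definition above) =====
theorem isListEmpty_spec : Claim_equal_isListEmpty := by
  intro s _
  unfold Spec_isListEmpty
  simp only [isListEmpty, isListEmpty_alt]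
  have hsplit : PySem.Str.split? s ","
      = some ((PySem.Chars.splitOn s.toList [',']).map String.ofList) := by
    simp [PySem.Str.split?, PySem.Chars.split?]
  rw [hsplit, Option.getD_some, pv_count_eq]
  have hrep : (PySem.Str.replace s "," "").toList = s.toList.filter (fun c => c != ',') := by
    rw [PySem.Str.toList_replace]
    exact pv_replace_comma s.toList
  -- the two emptiness tests are the same condition on the characters of s
  have key : (((PySem.Chars.splitOn s.toList [',']).map String.ofList).countP
        (fun e => decide (PySem.Str.strip e ≠ "")) = 0)
      ↔ PySem.Str.strip (PySem.Str.replace s "," "") = "" := by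
    rw [List.countP_map, List.countP_eq_zero,
      ← String.toList_eq_nil_iff, PySem.Str.toList_strip, hrep, pv_strip_eq_nil_iff]
    constructor
    · intro h c hc
      have hc' := hc
      rw [← pv_splitOn_flatten] at hc'
      obtain ⟨p, hp, hcp⟩ := List.mem_flatten.mp hc'
      have := h p hp
      simp only [Function.comp, ne_eq, decide_not, Bool.not_eq_true', decide_eq_false_iff_not,
        Decidable.not_not, ← String.toList_eq_nil_iff, PySem.Str.toList_strip,
        String.toList_ofList] at this
      exact (pv_strip_eq_nil_iff p).mp this c hcp
    · intro h p hp
      have hps : PySem.Chars.strip p = [] := by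
        rw [pv_strip_eq_nil_iff]
        intro c hc
        refine h c ?_
        rw [← pv_splitOn_flatten]
        exact List.mem_flatten.mpr ⟨p, hp, hc⟩
      simp [Function.comp, ← String.toList_eq_nil_iff, PySem.Str.toList_strip,
        String.toList_ofList, hps]
  by_cases hc : ((PySem.Chars.splitOn s.toList [',']).map String.ofList).countP
      (fun e => decide (PySem.Str.strip e ≠ "")) = 0
  · rw [beq_iff_eq.mpr (show ((((PySem.Chars.splitOn s.toList [',']).map String.ofList).countP
        (fun e => decide (PySem.Str.strip e ≠ "")) : Int)) = 0 by exact_mod_cast hc)]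
    have h2 : (PySem.Str.strip (PySem.Str.replace s "," "") == "") = true :=
      beq_iff_eq.mpr (key.mp hc)
    rw [h2]
    simp
  · have h1 : ((((PySem.Chars.splitOn s.toList [',']).map String.ofList).countP
        (fun e => decide (PySem.Str.strip e ≠ "")) : Int) == 0) = false :=
      beq_eq_false_iff_ne.mpr (fun h => hc (by exact_mod_cast h))
    rw [h1]
    have h2 : (PySem.Str.strip (PySem.Str.replace s "," "") == "") = false :=
      beq_eq_false_iff_ne.mpr (fun h => hc (key.mpr h))
    rw [h2]
    simp
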